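-- pv_equiv track=rewrite | github.com/google/or-tools | examples/python/arc_flow_cutting_stock_sat.py | regroup_and_count
-- ===== SOURCE A (Python) =====
-- import collections
--
-- def regroup_and_count(raw_input):
--     """Regroup all equal capacities in a multiset."""
--     grouped = collections.defaultdict(int)
--     for i in raw_input:
--         grouped[i] += 1
--     output = []
--     for size, count in grouped.items():
--         output.append([size, count])
--     output.sort(reverse=False)
--     return output
-- ===== SOURCE B (Python) =====
-- def regroup_and_count(raw_input):
--     """Regroup all equal capacities in a multiset."""
--     s = sorted(raw_input)
--     output = []
--     cur = 0
--     count = 0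
--     for x in s:
--         if count and x == cur:
--             count += 1
--         else:
--             if count:
--                 output.append([cur, count])
--             cur = x
--             count = 1
--     if count:
--         output.append([cur, count])
--     return output
-- ===== Notes on version B (the rewrite author's own statement) =====
-- stated objective: faster
-- what changed: Replaced the hash-count-then-sort-keys approach (defaultdict counter, build pair list, sort it) by sort-first then a single run-length grouping pass over the sorted list, with no dict and no final sort of pairs.
import Mathlib
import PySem

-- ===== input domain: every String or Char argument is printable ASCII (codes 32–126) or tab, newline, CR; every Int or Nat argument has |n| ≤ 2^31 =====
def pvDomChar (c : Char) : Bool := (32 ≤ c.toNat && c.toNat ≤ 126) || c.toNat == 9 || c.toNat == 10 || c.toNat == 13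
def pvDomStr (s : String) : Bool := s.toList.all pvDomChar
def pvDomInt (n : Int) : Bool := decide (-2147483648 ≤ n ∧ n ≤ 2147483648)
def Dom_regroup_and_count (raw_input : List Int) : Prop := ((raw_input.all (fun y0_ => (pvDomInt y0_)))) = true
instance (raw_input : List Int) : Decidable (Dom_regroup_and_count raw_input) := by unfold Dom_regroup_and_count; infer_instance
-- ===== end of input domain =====

-- B replaces A's dict-count-then-sort-keys by sort-first then one run-length grouping pass (alternative decomposition, same O(n log n) cost; raw_input is not mutated).

-- ===== PORT A =====
def regroup_and_count (raw_input : List Int) : List (List Int) :=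
  let grouped := raw_input.foldl (fun d i => d.modify i 0 (· + 1)) PySem.Dict.empty
  let output := grouped.items.foldl (fun out p => out ++ [[p.1, p.2]]) []
  PySem.List.sorted output (fun l => l) false

-- ===== PORT B =====
-- one step of Source B's grouping loop over the sorted list; state = (output, cur, count)
def rcStep (st : List (List Int) × Int × Int) (x : Int) : List (List Int) × Int × Int :=
  if st.2.2 ≠ 0 ∧ x = st.2.1 then (st.1, st.2.1, st.2.2 + 1)
  else ((if st.2.2 ≠ 0 then st.1 ++ [[st.2.1, st.2.2]] else st.1), x, 1)

def regroup_and_count_alt (raw_input : List Int) : List (List Int) :=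
  let s := PySem.List.sorted raw_input (fun v => v) false
  let st := s.foldl rcStep ([], 0, 0)
  if st.2.2 ≠ 0 then st.1 ++ [[st.2.1, st.2.2]] else st.1

-- ===== PRECONDITION & SPEC =====
def Spec_regroup_and_count (raw_input : List Int) (out : List (List Int)) : Prop := out = regroup_and_count_alt raw_input
instance (raw_input : List Int) (out : List (List Int)) : Decidable (Spec_regroup_and_count raw_input out) := by unfold Spec_regroup_and_count; infer_instance

-- ===== CLAIM (what is proved, stated in full; the proofs are below) =====
def Claim_equal_regroup_and_count : Prop := ∀ (raw_input : List Int), Dom_regroup_and_count raw_input → Spec_regroup_and_count raw_input (regroup_and_count raw_input)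

-- ===== LEMMAS AND PROOFS =====

-- membership in an accumulator is preserved by Set.add folds
theorem pv_foldl_add_skip {x : Int} : ∀ (l : List Int) (s : PySem.Set Int), x ∈ s →
    l.foldl PySem.Set.add s = (l.filter (fun y => y != x)).foldl PySem.Set.add s := by
  intro l
  induction l with
  | nil => intro s _; rfl
  | cons y l ih =>
    intro s hx
    by_cases hyx : y = x
    · subst hyx
      simp only [List.foldl_cons, List.filter_cons, bne_self_eq_false, PySem.Set.add_of_mem hx]
      exact ih s hx
    · have : (y != x) = true := by simpa using hyx
      simp only [List.foldl_cons, List.filter_cons, this]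
      exact ih (PySem.Set.add s y) (by rw [PySem.Set.mem_add]; exact Or.inl hx)

theorem pv_foldl_add_cons : ∀ (l : List Int) (s : PySem.Set Int) (x : Int), (∀ y ∈ l, y ≠ x) →
    l.foldl PySem.Set.add (x :: s) = x :: l.foldl PySem.Set.add s := by
  intro l
  induction l with
  | nil => intro s x _; rfl
  | cons y l ih =>
    intro s x h
    have hyx : y ≠ x := h y (by simp)
    have hadd : PySem.Set.add (x :: s) y = x :: PySem.Set.add s y := by
      rw [PySem.Set.add_eq_ite, PySem.Set.add_eq_ite]
      by_cases hm : y ∈ s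
      · simp [hm]
      · have : y ∉ (x :: s) := by simp [hyx, hm]
        simp [hm, this]
    simp only [List.foldl_cons, hadd]
    exact ih (PySem.Set.add s y) x (fun z hz => h z (by simp [hz]))

theorem pv_ofList_cons (x : Int) (l : List Int) :
    PySem.Set.ofList (x :: l) = x :: PySem.Set.ofList (l.filter (fun y => y != x)) := by
  have h1 : PySem.Set.ofList (x :: l) = l.foldl PySem.Set.add [x] := rfl
  rw [h1, pv_foldl_add_skip (x := x) l [x] (List.mem_singleton_self x)]
  have h2 : ∀ y ∈ l.filter (fun y => y != x), y ≠ x := by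
    intro y hy
    have := List.of_mem_filter hy
    simpa using this
  have : ([x] : List Int) = x :: ([] : List Int) := rfl
  rw [this, pv_foldl_add_cons _ [] x h2]
  rfl

-- Set.ofList is a sublist of its input
theorem pv_foldl_add_sublist : ∀ (l : List Int) (s : PySem.Set Int),
    ∃ r, l.foldl PySem.Set.add s = s ++ r ∧ r.Sublist l := by
  intro l
  induction l with
  | nil => intro s; exact ⟨[], by simp, List.Sublist.refl _⟩
  | cons x l ih =>
    intro s
    rw [List.foldl_cons, PySem.Set.add_eq_ite]
    by_cases hm : x ∈ s
    · obtain ⟨r, hr, hs⟩ := ih s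
      exact ⟨r, by simp [hm, hr], hs.cons x⟩
    · obtain ⟨r, hr, hs⟩ := ih (s ++ [x])
      exact ⟨x :: r, by simp [hm, hr], hs.cons₂ x⟩

theorem pv_ofList_sublist (l : List Int) : (PySem.Set.ofList l).Sublist l := by
  obtain ⟨r, hr, hs⟩ := pv_foldl_add_sublist l []
  rw [PySem.Set.ofList_eq_foldl]
  simpa [PySem.Set.empty] using hr ▸ hs

-- the core run-length invariant of B's loop, on a sorted suffix
theorem pv_run : ∀ (t : List Int), t.Pairwise (· ≤ ·) →
    ∀ (out : List (List Int)) (cur c : Int), 1 ≤ c → (∀ y ∈ t, cur ≤ y) →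
    (let st := t.foldl rcStep (out, cur, c);
     if st.2.2 ≠ 0 then st.1 ++ [[st.2.1, st.2.2]] else st.1)
    = out ++ ([cur, c + (t.count cur : Int)]) ::
        (PySem.Set.ofList (t.filter (fun y => y != cur))).map (fun k => [k, ((t.count k : Nat) : Int)]) := by
  intro t
  induction t with
  | nil =>
    intro _ out cur c hc _
    simp only [List.foldl_nil]
    have : c ≠ 0 := by omega
    simp [this]
  | cons x t ih =>
    intro hp out cur c hc hlb
    have hcur_x : cur ≤ x := hlb x (by simp)
    have hpt : t.Pairwise (· ≤ ·) := hp.tail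
    have hxt : ∀ y ∈ t, x ≤ y := fun y hy => (List.pairwise_cons.mp hp).1 y hy
    have hc0 : c ≠ 0 := by omega
    by_cases hx : x = cur
    · subst hx
      have hstep : rcStep (out, x, c) x = (out, x, c + 1) := by
        simp [rcStep, hc0]
      simp only [List.foldl_cons, hstep]
      rw [ih hpt out x (c + 1) (by omega) hxt]
      have hcount : (c + 1) + (t.count x : Int) = c + ((x :: t).count x : Int) := by
        simp; ring
      have hfilt : (x :: t).filter (fun y => y != x) = t.filter (fun y => y != x) := by
        simp
      have hmap : (PySem.Set.ofList (t.filter (fun y => y != x))).map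
            (fun k => ([k, ((t.count k : Nat) : Int)] : List Int))
          = (PySem.Set.ofList (t.filter (fun y => y != x))).map
            (fun k => [k, (((x :: t).count k : Nat) : Int)]) := by
        apply List.map_congr_left
        intro k hk
        have hk' : k ∈ t.filter (fun y => y != x) := (PySem.Set.mem_ofList _ _).mp hk
        have hkx : k ≠ x := by simpa using List.of_mem_filter hk'
        simp [Ne.symm hkx]
      rw [hmap, hfilt, hcount]
    · have hlt : cur < x := lt_of_le_of_ne hcur_x (fun h => hx h.symm)
      have hstep : rcStep (out, cur, c) x = (out ++ [[cur, c]], x, 1) := by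
        simp [rcStep, hc0, hx]
      simp only [List.foldl_cons, hstep]
      rw [ih hpt (out ++ [[cur, c]]) x 1 (by omega) hxt]
      have hne_cur : ∀ y ∈ t, y ≠ cur := fun y hy => by
        have := hxt y hy; omega
      have hcount0 : ((x :: t).count cur : Int) = 0 := by
        have : t.count cur = 0 := List.count_eq_zero.mpr (fun h => hne_cur cur h rfl)
        simp [this, hx]
      have hfilt : (x :: t).filter (fun y => y != cur) = x :: t := by
        rw [List.filter_cons]
        have h1 : (x != cur) = true := by simpa using hx
        rw [if_pos h1, List.filter_eq_self.mpr (fun y hy => by simpa using hne_cur y hy)]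
      have hmap : (PySem.Set.ofList (t.filter (fun y => y != x))).map
            (fun k => ([k, ((t.count k : Nat) : Int)] : List Int))
          = (PySem.Set.ofList (t.filter (fun y => y != x))).map
            (fun k => [k, (((x :: t).count k : Nat) : Int)]) := by
        apply List.map_congr_left
        intro k hk
        have hk' : k ∈ t.filter (fun y => y != x) := (PySem.Set.mem_ofList _ _).mp hk
        have hkx : k ≠ x := by simpa using List.of_mem_filter hk'
        simp [Ne.symm hkx]
      have hhead : (1 + (t.count x : Int)) = (((x :: t).count x : Nat) : Int) := by
        simp; ring
      rw [hfilt, pv_ofList_cons x t, hcount0]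
      simp only [List.map_cons, hmap, hhead]
      simp

-- B's whole loop on any sorted list yields the distinct values with their counts
theorem pv_rl (s : List Int) (hp : s.Pairwise (· ≤ ·)) :
    (let st := s.foldl rcStep ([], 0, 0);
     if st.2.2 ≠ 0 then st.1 ++ [[st.2.1, st.2.2]] else st.1)
    = (PySem.Set.ofList s).map (fun k => [k, ((s.count k : Nat) : Int)]) := by
  cases s with
  | nil => rfl
  | cons m t =>
    have hlb : ∀ y ∈ t, m ≤ y := fun y hy => (List.pairwise_cons.mp hp).1 y hy
    have hstep1 : rcStep ([], 0, 0) m = ([], m, 1) := by simp [rcStep]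
    simp only [List.foldl_cons, hstep1]
    rw [pv_run t hp.tail [] m 1 (by omega) hlb, pv_ofList_cons m t]
    simp only [List.map_cons, List.nil_append]
    have hhead : (1 + (t.count m : Int)) = (((m :: t).count m : Nat) : Int) := by
      simp; ring
    rw [hhead]
    congr 1
    apply List.map_congr_left
    intro k hk
    have hk' : k ∈ t.filter (fun y => y != m) := (PySem.Set.mem_ofList _ _).mp hk
    have hkm : k ≠ m := by simpa using List.of_mem_filter hk'
    simp [Ne.symm hkm]

-- B computes the sorted distinct values paired with their counts
theorem pv_B_eq (xs : List Int) :
    regroup_and_count_alt xs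
    = (PySem.Set.ofList (PySem.List.sorted xs (fun v => v) false)).map
        (fun k => [k, ((xs.count k : Nat) : Int)]) := by
  have hperm : (PySem.List.sorted xs (fun v => v) false).Perm xs :=
    PySem.List.sorted_perm xs (fun v => v) false
  have hp : (PySem.List.sorted xs (fun v => v) false).Pairwise (· ≤ ·) := by
    simpa using PySem.List.sorted_pairwise xs (fun v => v)
  show (let st := (PySem.List.sorted xs (fun v => v) false).foldl rcStep ([], 0, 0);
        if st.2.2 ≠ 0 then st.1 ++ [[st.2.1, st.2.2]] else st.1) = _
  rw [pv_rl _ hp]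
  apply List.map_congr_left
  intro k _
  rw [hperm.count_eq]

-- the port's sort elaborates with List.instLT; the order lemmas use the (propositionally equal) LinearOrder instance
theorem pv_sorted_inst (l : List (List Int)) :
    @PySem.List.sorted (List Int) (List Int) List.instLT (fun a b => a.decidableLT b) l (fun x => x) false
  = @PySem.List.sorted (List Int) (List Int) LinearOrder.toPartialOrder.toLT LinearOrder.toDecidableLT l (fun x => x) false := by
  have h1 := @PySem.List.sorted_eq_foldl_insertBy (List Int) (List Int) List.instLT (fun a b => a.decidableLT b) l (fun x => x)
  have h2 := @PySem.List.sorted_eq_foldl_insertBy (List Int) (List Int) LinearOrder.toPartialOrder.toLT LinearOrder.toDecidableLT l (fun x => x)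
  rw [h1, h2]
  congr 1
  funext acc x
  congr 1
  funext a b
  exact decide_eq_decide.mpr Iff.rfl

-- A computes the same list, from the counter dict and the final sort
theorem pv_A_eq (xs : List Int) :
    regroup_and_count xs
    = (PySem.Set.ofList (PySem.List.sorted xs (fun v => v) false)).map
        (fun k => [k, ((xs.count k : Nat) : Int)]) := by
  have houtput : (PySem.Dict.counter xs).items.foldl (fun out p => out ++ [[p.1, p.2]]) ([] : List (List Int))
      = (PySem.Set.ofList xs).map (fun k => [k, ((xs.count k : Nat) : Int)]) := by
    rw [PySem.Dict.items_counter, PySem.List.foldl_append_singleton_eq_map, List.map_map]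
    rfl
  show PySem.List.sorted
      ((xs.foldl (fun d i => d.modify i 0 (· + 1)) PySem.Dict.empty).items.foldl
        (fun out p => out ++ [[p.1, p.2]]) []) (fun l => l) false = _
  rw [show xs.foldl (fun d i => d.modify i 0 (· + 1)) PySem.Dict.empty = PySem.Dict.counter xs
        from (PySem.Dict.counter_eq_foldl xs).symm, houtput, pv_sorted_inst]
  set s := PySem.List.sorted xs (fun v => v) false with hs
  have hperm : s.Perm xs := PySem.List.sorted_perm xs (fun v => v) false
  -- the target list: distinct values of the sorted list, in increasing order
  apply PySem.List.sorted_eq_of_perm_of_pairwise_lt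
  · apply List.Perm.map
    apply (List.perm_ext_iff_of_nodup (PySem.Set.nodup_ofList s) (PySem.Set.nodup_ofList xs)).mpr
    intro a
    rw [PySem.Set.mem_ofList, PySem.Set.mem_ofList]
    exact hperm.mem_iff
  · have hps : s.Pairwise (· ≤ ·) := by
      simpa using PySem.List.sorted_pairwise xs (fun v => v)
    have hle : (PySem.Set.ofList s).Pairwise (· ≤ ·) := hps.sublist (pv_ofList_sublist s)
    have hne : (PySem.Set.ofList s).Pairwise (· ≠ ·) := PySem.Set.nodup_ofList s
    have hlt : (PySem.Set.ofList s).Pairwise (· < ·) :=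
      (hle.and hne).imp (fun h => lt_of_le_of_ne h.1 h.2)
    refine List.Pairwise.map _ (fun a b hab => ?_) hlt
    exact (List.lt_iff_lex_lt _ _).mpr (List.Lex.rel hab)

-- ===== VERDICT (by name: the statement is the Claim_ definition above) =====
theorem regroup_and_count_spec : Claim_equal_regroup_and_count := by
  intro xs _
  unfold Spec_regroup_and_count
  rw [pv_A_eq, pv_B_eq]
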